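-- pv_equiv track=rewrite | github.com/oratiek/py-tetris | tetris.py | get_right_blocks
-- ===== SOURCE A (Python) =====
-- def get_right_blocks (active_mino):
--     # 最も右にあるブロックのインデックスを返す(左の壁かブロックに衝突する可能性があるもの)
--     biggest_column = None
--     right_blocks = []
--     for block in active_mino:
--         row = block[0]
--         column = block[1]
--         if biggest_column == None: # first commit
--             biggest_column = column
--             right_blocks.append([row,column])
--         else:
--             if column == biggest_column:
--                 biggest_column = column
--                 right_blocks.append([row, column])
--             if column > biggest_column:
--                 biggest_column = column
--                 right_blocks = []
--                 right_blocks.append([row, column])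
--
--     return right_blocks
-- ===== SOURCE B (Python) =====
-- def get_right_blocks(active_mino):
--     # Simpler two-pass: find the maximum column, then keep blocks in that column.
--     if not active_mino:
--         return []
--     max_col = max(b[1] for b in active_mino)
--     return [[b[0], b[1]] for b in active_mino if b[1] == max_col]
-- ===== Notes on version B (the rewrite author's own statement) =====
-- stated objective: simpler
-- what changed: Replaces A's single accumulation pass (running biggest_column with a reset of the result list whenever a bigger column appears) by a max-then-filter two-pass decomposition.
import Mathlib
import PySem

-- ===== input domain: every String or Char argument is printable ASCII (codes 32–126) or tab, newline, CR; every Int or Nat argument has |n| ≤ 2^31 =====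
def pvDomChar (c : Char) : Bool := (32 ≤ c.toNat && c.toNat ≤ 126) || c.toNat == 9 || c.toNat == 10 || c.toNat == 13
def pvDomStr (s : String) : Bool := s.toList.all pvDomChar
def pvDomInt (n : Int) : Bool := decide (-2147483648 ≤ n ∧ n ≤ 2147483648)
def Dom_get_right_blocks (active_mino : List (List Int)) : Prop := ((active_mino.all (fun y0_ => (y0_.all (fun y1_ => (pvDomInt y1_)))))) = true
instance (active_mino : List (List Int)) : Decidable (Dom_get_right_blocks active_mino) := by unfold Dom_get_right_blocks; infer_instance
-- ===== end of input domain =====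

-- B replaces A's single running-max pass (which resets the result list on a bigger column) by a simpler max-then-filter two-pass version.

-- shared accessors: block[0] and block[1] as both Pythons read them
def pvRow (b : List Int) : Int := PySem.List.pyGetD b 0 0
def pvCol (b : List Int) : Int := PySem.List.pyGetD b 1 0

-- ===== PORT A =====
-- one loop iteration of A: state = (biggest_column, right_blocks)
def pvStepA (st : Option Int × List (List Int)) (block : List Int) : Option Int × List (List Int) :=
  let row := pvRow block
  let column := pvCol block
  match st.1 with
  | none => (some column, st.2 ++ [[row, column]])
  | some bc =>
      if column = bc then (some column, st.2 ++ [[row, column]])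
      else if column > bc then (some column, [[row, column]])
      else (some bc, st.2)

def get_right_blocks (active_mino : List (List Int)) : List (List Int) :=
  (active_mino.foldl pvStepA (none, [])).2

-- ===== PORT B =====
-- B's list comprehension: the blocks whose column equals x, as fresh [row, column] pairs
def pvFilt (m : List (List Int)) (x : Int) : List (List Int) :=
  m.filterMap (fun b => if pvCol b = x then some [pvRow b, pvCol b] else none)

def get_right_blocks_alt (active_mino : List (List Int)) : List (List Int) :=
  if active_mino = [] then []
  else
    let max_col := (PySem.List.max? (active_mino.map pvCol) (fun x => x)).getD 0
    pvFilt active_mino max_col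

-- ===== PRECONDITION & SPEC =====
-- Pre_ excludes exactly the inputs where A raises IndexError (a block with fewer than 2 entries); B raises there too.
def Pre_get_right_blocks (active_mino : List (List Int)) : Prop :=
  ∀ b ∈ active_mino, 2 ≤ b.length
instance (active_mino : List (List Int)) : Decidable (Pre_get_right_blocks active_mino) := by unfold Pre_get_right_blocks; infer_instance

def pvWitness_get_right_blocks : List (List Int) := [[0, 1], [2, 3], [4, 3]]

def Spec_get_right_blocks (active_mino : List (List Int)) (out : List (List Int)) : Prop := out = get_right_blocks_alt active_mino
instance (active_mino : List (List Int)) (out : List (List Int)) : Decidable (Spec_get_right_blocks active_mino out) := by unfold Spec_get_right_blocks; infer_instance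

-- ===== CLAIM (what is proved, stated in full; the proofs are below) =====
def Claim_equal_get_right_blocks : Prop := ∀ (active_mino : List (List Int)), Dom_get_right_blocks active_mino → Pre_get_right_blocks active_mino → Spec_get_right_blocks active_mino (get_right_blocks active_mino)

-- ===== LEMMAS AND PROOFS =====

-- running max of the columns starting at M
def pvMc (m : List (List Int)) (M : Int) : Int := m.foldl (fun acc b => max acc (pvCol b)) M

theorem pvMc_cons (b : List Int) (t : List (List Int)) (M : Int) :
    pvMc (b :: t) M = pvMc t (max M (pvCol b)) := rfl

theorem pvMc_le (m : List (List Int)) (M : Int) : M ≤ pvMc m M := by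
  induction m generalizing M with
  | nil => simp [pvMc]
  | cons b t ih =>
      have := ih (max M (pvCol b))
      rw [pvMc_cons]
      omega

theorem pvFilt_cons (b : List Int) (t : List (List Int)) (x : Int) :
    pvFilt (b :: t) x = (if pvCol b = x then [[pvRow b, pvCol b]] else []) ++ pvFilt t x := by
  by_cases h : pvCol b = x <;> simp [pvFilt, h]

-- the loop invariant of A: from state (some M, R), the fold returns the running max and
-- either appends the matching blocks to R (no bigger column seen) or restarts on the new max
theorem foldl_stepA (m : List (List Int)) (M : Int) (R : List (List Int)) :
    m.foldl pvStepA (some M, R) =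
      (some (pvMc m M), if M < pvMc m M then pvFilt m (pvMc m M) else R ++ pvFilt m M) := by
  induction m generalizing M R with
  | nil => simp [pvMc, pvFilt]
  | cons b t ih =>
      have hle := pvMc_le t M
      rcases lt_trichotomy (pvCol b) M with h | h | h
      · have hs : pvStepA (some M, R) b = (some M, R) := by
          simp only [pvStepA]
          rw [if_neg (by omega), if_neg (by omega)]
        rw [List.foldl_cons, hs, ih, pvMc_cons, show max M (pvCol b) = M by omega]
        split_ifs with h2
        · rw [pvFilt_cons, if_neg (by omega)]; simp
        · rw [pvFilt_cons, if_neg (by omega)]; simp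
      · have hs : pvStepA (some M, R) b = (some M, R ++ [[pvRow b, M]]) := by
          simp only [pvStepA]
          rw [if_pos h, h]
        rw [List.foldl_cons, hs, ih, pvMc_cons, show max M (pvCol b) = M by omega]
        split_ifs with h2
        · rw [pvFilt_cons, if_neg (by omega)]; simp
        · rw [pvFilt_cons, if_pos h, h]
          simp [List.append_assoc]
      · have hs : pvStepA (some M, R) b = (some (pvCol b), [[pvRow b, pvCol b]]) := by
          simp only [pvStepA]
          rw [if_neg (by omega), if_pos (by omega)]
        rw [List.foldl_cons, hs, ih, pvMc_cons, show max M (pvCol b) = pvCol b by omega]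
        have hle2 := pvMc_le t (pvCol b)
        rw [if_pos (show M < pvMc t (pvCol b) by omega)]
        by_cases h2 : pvCol b < pvMc t (pvCol b)
        · rw [if_pos h2, pvFilt_cons, if_neg (by omega)]; simp
        · have he : pvMc t (pvCol b) = pvCol b := by omega
          rw [if_neg h2, he, pvFilt_cons, if_pos rfl]

-- ===== VERDICT (by name: the statement is the Claim_ definition above) =====
theorem get_right_blocks_spec : Claim_equal_get_right_blocks := by
  intro m _ _
  unfold Spec_get_right_blocks get_right_blocks get_right_blocks_alt
  cases m with
  | nil => simp
  | cons b t =>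
      have hs : pvStepA (none, ([] : List (List Int))) b = (some (pvCol b), [[pvRow b, pvCol b]]) := by
        simp [pvStepA]
      rw [List.foldl_cons, hs, foldl_stepA, if_neg (List.cons_ne_nil b t)]
      simp only [List.map_cons, PySem.List.max?_id_cons, Option.getD_some]
      rw [show (t.map pvCol).foldl max (pvCol b) = pvMc t (pvCol b) by
            simp only [pvMc, List.foldl_map]]
      have hle := pvMc_le t (pvCol b)
      by_cases h : pvCol b < pvMc t (pvCol b)
      · rw [if_pos h, pvFilt_cons, if_neg (by omega)]; simp
      · have he : pvMc t (pvCol b) = pvCol b := by omega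
        rw [if_neg h, he, pvFilt_cons, if_pos rfl]
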